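-- pv_equiv track=rewrite | github.com/Pandaemonium/CausalOctonionGraph | cog_v2/calc/build_theta001_nonzero_robust_casebook_v1.py | _rotate_ops
-- ===== SOURCE A (Python) =====
-- from typing import Any, Dict, List, Sequence, Tuple
--
-- def _rotate_ops(ops: Sequence[int], shift: int) -> Tuple[int, ...]:
--     n = len(ops)
--     if n == 0:
--         return tuple()
--     k = int(shift) % n
--     if k == 0:
--         return tuple(int(x) for x in ops)
--     return tuple(int(x) for x in ops[k:]) + tuple(int(x) for x in ops[:k])
-- ===== SOURCE B (Python) =====
-- from typing import Sequence, Tuple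
--
-- def _rotate_ops(ops: Sequence[int], shift: int) -> Tuple[int, ...]:
--     buf = [int(x) for x in ops]
--     if not buf:
--         return tuple()
--     for _ in range(int(shift) % len(buf)):
--         buf.append(buf.pop(0))
--     return tuple(buf)
-- ===== Notes on version B (the rewrite author's own statement) =====
-- stated objective: alternative
-- what changed: Replaces A's split-into-two-slices-and-concatenate (with a k==0 special case) by iterating the elementary rotation 'move head element to the end' k = shift % n times on a mutable buffer; trades A's O(n) slicing for an O(n*k) sequence of single-element moves with no special cases.
import Mathlib
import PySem

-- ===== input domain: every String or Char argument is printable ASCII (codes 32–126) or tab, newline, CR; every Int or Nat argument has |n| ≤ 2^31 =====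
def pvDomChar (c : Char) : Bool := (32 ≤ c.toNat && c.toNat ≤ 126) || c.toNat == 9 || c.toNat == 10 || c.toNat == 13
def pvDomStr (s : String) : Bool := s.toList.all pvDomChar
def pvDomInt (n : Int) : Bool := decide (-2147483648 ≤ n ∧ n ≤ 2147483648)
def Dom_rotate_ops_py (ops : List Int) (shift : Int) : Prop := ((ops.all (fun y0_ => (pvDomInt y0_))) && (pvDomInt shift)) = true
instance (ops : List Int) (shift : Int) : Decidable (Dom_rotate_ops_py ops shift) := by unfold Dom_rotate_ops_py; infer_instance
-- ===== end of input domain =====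

-- B replaces A's two-slice split-and-concatenate (with its k==0 special case) by iterating
-- the elementary rotation "move head to end" k = shift % n times; alternative decomposition, not faster.

-- ===== PORT A =====
-- ops[k:] ++ ops[:k] via PySem slices; k = shift % n (Python floor mod, exact via PySem.Int.mod)
def rotate_ops_py (ops : List Int) (shift : Int) : List Int :=
  let n : Int := ops.length
  if n = 0 then []
  else
    let k := PySem.Int.mod shift n
    if k = 0 then ops
    else PySem.List.slice ops (some k) none ++ PySem.List.slice ops none (some k)

-- ===== PORT B =====
-- one iteration of the loop body: buf.append(buf.pop(0)), i.e. x::xs ↦ xs ++ [x]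
def rotStep (l : List Int) : List Int :=
  match l with
  | [] => []
  | x :: xs => xs ++ [x]

-- for _ in range(shift % len(buf)): buf.append(buf.pop(0))
def rotate_ops_py_alt (ops : List Int) (shift : Int) : List Int :=
  if ops = [] then []
  else
    (PySem.List.pyRange 0 (PySem.Int.mod shift (ops.length : Int)) 1).foldl
      (fun buf _ => rotStep buf) ops

-- ===== PRECONDITION & SPEC =====
def Spec_rotate_ops_py (ops : List Int) (shift : Int) (out : List Int) : Prop := out = rotate_ops_py_alt ops shift
instance (ops : List Int) (shift : Int) (out : List Int) : Decidable (Spec_rotate_ops_py ops shift out) := by unfold Spec_rotate_ops_py; infer_instance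

-- ===== CLAIM (what is proved, stated in full; the proofs are below) =====
def Claim_equal_rotate_ops_py : Prop := ∀ (ops : List Int) (shift : Int), Dom_rotate_ops_py ops shift → Spec_rotate_ops_py ops shift (rotate_ops_py ops shift)

-- ===== LEMMAS AND PROOFS =====

-- one elementary step is a rotation by 1
theorem rotStep_eq_rotate_one (l : List Int) : rotStep l = l.rotate 1 := by
  cases l with
  | nil => simp [rotStep]
  | cons x xs => simp [rotStep, List.rotate_cons_succ]

-- folding the constant step over any list of length m rotates by m
theorem foldl_rotStep (xs : List Int) (l : List Int) :
    xs.foldl (fun buf _ => rotStep buf) l = l.rotate xs.length := by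
  induction xs generalizing l with
  | nil => simp
  | cons a as ih =>
    rw [List.foldl_cons, ih, rotStep_eq_rotate_one, List.rotate_rotate,
      List.length_cons, Nat.add_comm]

theorem rotate_ops_py_eq_alt (ops : List Int) (shift : Int) :
    rotate_ops_py ops shift = rotate_ops_py_alt ops shift := by
  unfold rotate_ops_py rotate_ops_py_alt
  by_cases hnil : ops = []
  · simp [hnil]
  · have hpos : 0 < ops.length := List.length_pos_iff.mpr hnil
    have hposI : (0 : Int) < (ops.length : Int) := by exact_mod_cast hpos
    have hne : ((ops.length : Int)) ≠ 0 := by omega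
    simp only [hnil, if_false, hne]
    set k := PySem.Int.mod shift (ops.length : Int) with hk
    have hk0 : 0 ≤ k := PySem.Int.mod_nonneg shift hposI
    have hklt : k < (ops.length : Int) := PySem.Int.mod_lt shift hposI
    set kn := k.toNat with hkn
    have hkcast : (kn : Int) = k := Int.toNat_of_nonneg hk0
    have hknlt : kn < ops.length := by omega
    -- B side: the loop runs kn times, so it is rotate kn
    have hB : (PySem.List.pyRange 0 k 1).foldl (fun buf _ => rotStep buf) ops
        = ops.rotate kn := by
      rw [foldl_rotStep]
      congr 1
      rw [← hkcast, PySem.List.pyRange_zero_natCast, List.length_map, List.length_range]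
    rw [hB]
    -- A side is rotate kn as well
    by_cases hkz : k = 0
    · have : kn = 0 := by simp [hkn, hkz]
      simp [hkz, this]
    · simp only [hkz, if_false]
      rw [← hkcast, PySem.List.slice_from_natCast, PySem.List.slice_to_natCast,
        List.rotate_eq_drop_append_take (Nat.le_of_lt hknlt)]

-- ===== VERDICT (by name: the statement is the Claim_ definition above) =====
theorem rotate_ops_py_spec : Claim_equal_rotate_ops_py := by
  intro ops shift _
  unfold Spec_rotate_ops_py
  exact rotate_ops_py_eq_alt ops shift
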